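-- pv_equiv track=rewrite | github.com/pisskidney/tc | 447_2/all.py | maximalCost
-- ===== SOURCE A (Python) =====
-- def maximalCost(c, co):
--     c = list(c)
--     n = 0
--     co = list(co)
--     while c and co:
--         maxc = max(c)
--         maxco = max(co)
--         if maxco >= maxc:
--             co.remove(maxco)
--             n += 1
--         c.remove(maxc)
--     return n
-- ===== SOURCE B (Python) =====
-- def maximalCost(c, co):
--     cos = sorted(co, reverse=True)
--     n = 0
--     for x in sorted(c, reverse=True):
--         if n < len(cos) and cos[n] >= x:
--             n += 1
--     return n
-- ===== Notes on version B (the rewrite author's own statement) =====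
-- stated objective: faster
-- what changed: Replaced the repeated max()+remove() scans over shrinking copies with one descending sort of each list followed by a single linear greedy pass using the match count itself as the pointer into the sorted co list.
import Mathlib
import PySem

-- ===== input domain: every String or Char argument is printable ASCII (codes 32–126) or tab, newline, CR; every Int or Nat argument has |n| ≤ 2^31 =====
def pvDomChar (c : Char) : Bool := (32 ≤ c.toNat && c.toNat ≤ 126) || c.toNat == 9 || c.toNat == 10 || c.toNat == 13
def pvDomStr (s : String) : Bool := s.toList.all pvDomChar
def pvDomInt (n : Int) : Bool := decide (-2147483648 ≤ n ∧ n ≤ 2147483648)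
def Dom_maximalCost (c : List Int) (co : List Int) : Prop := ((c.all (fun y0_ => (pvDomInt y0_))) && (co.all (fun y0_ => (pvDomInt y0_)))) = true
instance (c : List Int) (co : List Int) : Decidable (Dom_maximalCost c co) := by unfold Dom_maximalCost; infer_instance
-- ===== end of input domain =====

-- B replaces A's repeated max()+remove() scans with one descending sort of each list and a
-- single linear greedy pass (objective: faster, O(n log n) instead of O(n^2)).

-- ===== PORT A =====
-- helper for the loop's termination measure: a successful remove() shortens the list
theorem pvRemoveLen (xs : List Int) (v : Int) (ys : List Int)
    (h : PySem.List.remove? xs v = some ys) : ys.length < xs.length := by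
  simp only [PySem.List.remove?, Option.map_eq_some_iff] at h
  obtain ⟨k, hk, rfl⟩ := h
  obtain ⟨hlt, -⟩ := List.idxOf?_eq_some_iff.mp hk
  simp [List.length_eraseIdx, hlt]
  omega

-- the while-loop of A: n accumulates; each pass removes max(c) and, if max(co) >= max(c), max(co)
def maximalCostLoop (c : List Int) (co : List Int) (n : Int) : Int :=
  if c = [] ∨ co = [] then n
  else
    match PySem.List.max? c (fun y => y), PySem.List.max? co (fun y => y) with
    | some maxc, some maxco =>
      if maxco ≥ maxc then
        match PySem.List.remove? co maxco, hc : PySem.List.remove? c maxc with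
        | some co2, some c2 => maximalCostLoop c2 co2 (n + 1)
        | _, _ => n
      else
        match hc : PySem.List.remove? c maxc with
        | some c2 => maximalCostLoop c2 co n
        | none => n
    | _, _ => n
termination_by c.length
decreasing_by
  · exact pvRemoveLen _ _ _ hc
  · exact pvRemoveLen _ _ _ hc

def maximalCost (c : List Int) (co : List Int) : Int :=
  maximalCostLoop c co 0

-- ===== PORT B =====
def maximalCost_alt (c : List Int) (co : List Int) : Int :=
  let cos := PySem.List.sorted co (fun y => y) true
  (PySem.List.sorted c (fun y => y) true).foldl
    (fun n x => if n < (cos.length : Int) ∧ PySem.List.pyGetD cos n 0 ≥ x then n + 1 else n) 0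

-- ===== PRECONDITION & SPEC =====
def Spec_maximalCost (c : List Int) (co : List Int) (out : Int) : Prop := out = maximalCost_alt c co
instance (c : List Int) (co : List Int) (out : Int) : Decidable (Spec_maximalCost c co out) := by unfold Spec_maximalCost; infer_instance

-- ===== CLAIM (what is proved, stated in full; the proofs are below) =====
def Claim_equal_maximalCost : Prop := ∀ (c : List Int) (co : List Int), Dom_maximalCost c co → Spec_maximalCost c co (maximalCost c co)

-- ===== LEMMAS AND PROOFS =====

-- the two-pointer greedy on descending lists, as a recursion (proof-side model of B's pass)
def pvGo : List Int → List Int → Int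
  | [], _ => 0
  | _ :: _, [] => 0
  | a :: cs, b :: cos => if b ≥ a then 1 + pvGo cs cos else pvGo cs (b :: cos)

theorem pvGo_nil_right (cs : List Int) : pvGo cs [] = 0 := by
  cases cs <;> rfl

-- B's indexed foldl equals pvGo on the dropped suffix
theorem pvFoldlGo (cos : List Int) : ∀ (cs : List Int) (j : Nat), j ≤ cos.length →
    cs.foldl (fun n x => if n < (cos.length : Int) ∧ PySem.List.pyGetD cos n 0 ≥ x then n + 1 else n) (j : Int)
      = (j : Int) + pvGo cs (cos.drop j) := by
  intro cs
  induction cs with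
  | nil => intro j hj; simp [pvGo]
  | cons x cs ih =>
    intro j hj
    simp only [List.foldl_cons]
    by_cases hjl : j < cos.length
    · have hdrop : cos.drop j = cos[j] :: cos.drop (j + 1) := List.drop_eq_getElem_cons hjl
      rw [PySem.List.pyGetD_natCast]
      have hget : cos.getD j 0 = cos[j] := List.getD_eq_getElem cos 0 hjl
      by_cases hge : cos[j] ≥ x
      · have hcond : ((j : Int) < (cos.length : Int) ∧ cos.getD j 0 ≥ x) := by
          constructor
          · exact_mod_cast hjl
          · rw [hget]; exact hge
        rw [if_pos hcond]
        have : ((j : Int) + 1) = ((j + 1 : Nat) : Int) := by push_cast; ring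
        rw [this, ih (j + 1) hjl]
        rw [hdrop]
        simp [pvGo, hge]
        ring
      · have hcond : ¬ ((j : Int) < (cos.length : Int) ∧ cos.getD j 0 ≥ x) := by
          rw [hget]; tauto
        rw [if_neg hcond, ih j hj, hdrop]
        simp [pvGo, hge]
    · have hj' : j = cos.length := le_antisymm hj (not_lt.mp hjl)
      have hdrop : cos.drop j = [] := by simp [hj']
      have hcond : ¬ ((j : Int) < (cos.length : Int) ∧ PySem.List.pyGetD cos (j : Int) 0 ≥ x) := by
        rw [hj']; simp
      rw [if_neg hcond, ih j hj, hdrop, pvGo_nil_right, pvGo_nil_right]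

theorem pvAltGo (c co : List Int) :
    maximalCost_alt c co
      = pvGo (PySem.List.sorted c (fun y => y) true) (PySem.List.sorted co (fun y => y) true) := by
  unfold maximalCost_alt
  have h := pvFoldlGo (PySem.List.sorted co (fun y => y) true)
    (PySem.List.sorted c (fun y => y) true) 0 (Nat.zero_le _)
  simpa using h

-- max? gives the same value on permuted lists (id key)
theorem pvMaxPerm (c c' : List Int) (h : c.Perm c') :
    PySem.List.max? c (fun y => y) = PySem.List.max? c' (fun y => y) := by
  cases hc : PySem.List.max? c (fun y => y) with
  | none =>
    rw [PySem.List.max?_eq_none_iff] at hc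
    subst hc
    symm
    rw [PySem.List.max?_eq_none_iff]
    exact List.Perm.eq_nil h.symm
  | some m =>
    cases hc' : PySem.List.max? c' (fun y => y) with
    | none =>
      rw [PySem.List.max?_eq_none_iff] at hc'
      subst hc'
      have hnil : PySem.List.max? ([] : List Int) (fun y => y) = none :=
        (PySem.List.max?_eq_none_iff _ _).mpr rfl
      rw [List.Perm.eq_nil h, hnil] at hc
      exact absurd hc (by simp)
    | some m' =>
      have hm : m ∈ c := PySem.List.max?_mem hc
      have hm' : m' ∈ c' := PySem.List.max?_mem hc'
      have h1 : m ≤ m' := PySem.List.max?_isMax hc' m (h.mem_iff.mp hm)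
      have h2 : m' ≤ m := PySem.List.max?_isMax hc m' (h.mem_iff.mpr hm')
      rw [le_antisymm h1 h2]

-- one unfolding step of A's loop on a non-empty pair of lists
theorem pvLoopStep (c co : List Int) (n maxc maxco : Int) (c2 co2 : List Int)
    (h0 : ¬ (c = [] ∨ co = []))
    (hmc : PySem.List.max? c (fun y => y) = some maxc)
    (hmco : PySem.List.max? co (fun y => y) = some maxco)
    (hrc : PySem.List.remove? c maxc = some c2)
    (hrco : PySem.List.remove? co maxco = some co2) :
    maximalCostLoop c co n =
      if maxco ≥ maxc then maximalCostLoop c2 co2 (n + 1) else maximalCostLoop c2 co n := by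
  rw [maximalCostLoop, if_neg h0, hmc, hmco]
  by_cases hge : maxco ≥ maxc
  · simp only [if_pos hge, hrco]
    split
    · rename_i co2' c2' heq1 heq2
      rw [hrc] at heq2
      cases heq1; cases heq2; rfl
    · rename_i h1
      exact (h1 co2 c2 rfl hrc).elim
  · simp only [if_neg hge]
    split
    · rename_i c2' heq
      rw [hrc] at heq
      cases heq; rfl
    · rename_i heq
      rw [hrc] at heq
      exact absurd heq (by simp)

-- A's loop depends only on the multisets of c and co
theorem pvLoopPerm : ∀ (k : Nat) (c c' co co' : List Int) (n : Int), c.length = k →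
    c.Perm c' → co.Perm co' → maximalCostLoop c co n = maximalCostLoop c' co' n := by
  intro k
  induction k using Nat.strong_induction_on with
  | _ k ih =>
    intro c c' co co' n hk hc hco
    by_cases h0 : c = [] ∨ co = []
    · have h0' : c' = [] ∨ co' = [] := by
        rcases h0 with h | h
        · exact Or.inl (List.Perm.eq_nil (h ▸ hc).symm)
        · exact Or.inr (List.Perm.eq_nil (h ▸ hco).symm)
      rw [maximalCostLoop, maximalCostLoop, if_pos h0, if_pos h0']
    · have h0' : ¬ (c' = [] ∨ co' = []) := by
        push_neg at h0 ⊢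
        exact ⟨fun e => h0.1 (by rw [e] at hc; exact hc.eq_nil), fun e => h0.2 (by rw [e] at hco; exact hco.eq_nil)⟩
      have h0c := h0
      push_neg at h0
      obtain ⟨maxc, hmc⟩ : ∃ m, PySem.List.max? c (fun y => y) = some m := by
        cases hx : PySem.List.max? c (fun y => y) with
        | none => exact absurd ((PySem.List.max?_eq_none_iff _ _).mp hx) h0.1
        | some m => exact ⟨m, rfl⟩
      obtain ⟨maxco, hmco⟩ : ∃ m, PySem.List.max? co (fun y => y) = some m := by
        cases hx : PySem.List.max? co (fun y => y) with
        | none => exact absurd ((PySem.List.max?_eq_none_iff _ _).mp hx) h0.2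
        | some m => exact ⟨m, rfl⟩
      have hmc' : PySem.List.max? c' (fun y => y) = some maxc := (pvMaxPerm c c' hc).symm.trans hmc
      have hmco' : PySem.List.max? co' (fun y => y) = some maxco := (pvMaxPerm co co' hco).symm.trans hmco
      have hmemc : maxc ∈ c := PySem.List.max?_mem hmc
      have hmemco : maxco ∈ co := PySem.List.max?_mem hmco
      have hrc : PySem.List.remove? c maxc = some (c.erase maxc) :=
        PySem.List.remove?_eq_some_erase c maxc hmemc
      have hrc' : PySem.List.remove? c' maxc = some (c'.erase maxc) :=
        PySem.List.remove?_eq_some_erase c' maxc (hc.mem_iff.mp hmemc)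
      have hrco : PySem.List.remove? co maxco = some (co.erase maxco) :=
        PySem.List.remove?_eq_some_erase co maxco hmemco
      have hrco' : PySem.List.remove? co' maxco = some (co'.erase maxco) :=
        PySem.List.remove?_eq_some_erase co' maxco (hco.mem_iff.mp hmemco)
      have hlen : (c.erase maxc).length < k := by
        rw [List.length_erase_of_mem hmemc, ← hk]
        exact Nat.pred_lt (by simpa using List.length_pos_of_mem hmemc |>.ne')
      rw [pvLoopStep c co n maxc maxco _ _ h0c hmc hmco hrc hrco,
        pvLoopStep c' co' n maxc maxco _ _ h0' hmc' hmco' hrc' hrco']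
      by_cases hge : maxco ≥ maxc
      · rw [if_pos hge, if_pos hge]
        exact ih _ hlen _ _ _ _ _ rfl (hc.erase maxc) (hco.erase maxco)
      · rw [if_neg hge, if_neg hge]
        exact ih _ hlen _ _ _ _ _ rfl (hc.erase maxc) hco

-- foldl max of a list dominated by its seed
theorem pvFoldlMaxSelf (a : Int) (t : List Int) (h : ∀ y ∈ t, y ≤ a) : t.foldl max a = a := by
  induction t with
  | nil => rfl
  | cons x t ih =>
    simp only [List.foldl_cons]
    rw [max_eq_left (h x (by simp))]
    exact ih fun y hy => h y (by simp [hy])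

-- on descending-sorted lists A's loop computes exactly the two-pointer pass
theorem pvLoopSorted : ∀ (cs cos : List Int) (n : Int),
    cs.Pairwise (fun x y => y ≤ x) → cos.Pairwise (fun x y => y ≤ x) →
    maximalCostLoop cs cos n = n + pvGo cs cos := by
  intro cs
  induction cs with
  | nil => intro cos n _ _; rw [maximalCostLoop]; simp [pvGo]
  | cons a cs ih =>
    intro cos n hcs hcos
    cases cos with
    | nil => rw [maximalCostLoop]; simp [pvGo_nil_right]
    | cons b cos =>
      have hne : ¬ (a :: cs = [] ∨ b :: cos = []) := by simp
      have hmaxc : PySem.List.max? (a :: cs) (fun y => y) = some a := by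
        rw [PySem.List.max?_id_cons, pvFoldlMaxSelf a cs (by
          intro y hy; exact (List.pairwise_cons.mp hcs).1 y hy)]
      have hmaxco : PySem.List.max? (b :: cos) (fun y => y) = some b := by
        rw [PySem.List.max?_id_cons, pvFoldlMaxSelf b cos (by
          intro y hy; exact (List.pairwise_cons.mp hcos).1 y hy)]
      have hcs' := (List.pairwise_cons.mp hcs).2
      have hcos' := (List.pairwise_cons.mp hcos).2
      rw [pvLoopStep (a :: cs) (b :: cos) n a b cs cos hne hmaxc hmaxco
        (PySem.List.remove?_cons_self a cs) (PySem.List.remove?_cons_self b cos)]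
      by_cases hge : b ≥ a
      · rw [if_pos hge, ih cos (n + 1) hcs' hcos']
        simp [pvGo, hge]; ring
      · rw [if_neg hge, ih (b :: cos) n hcs' hcos]
        simp [pvGo, hge]

-- ===== VERDICT (by name: the statement is the Claim_ definition above) =====
theorem maximalCost_spec : Claim_equal_maximalCost := by
  unfold Claim_equal_maximalCost Spec_maximalCost
  intro c co _
  unfold maximalCost
  rw [pvLoopPerm c.length c (PySem.List.sorted c (fun y => y) true) co
    (PySem.List.sorted co (fun y => y) true) 0 rfl
    (PySem.List.sorted_perm c (fun y => y) true).symm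
    (PySem.List.sorted_perm co (fun y => y) true).symm]
  rw [pvLoopSorted _ _ 0
    (PySem.List.sorted_pairwise_rev c (fun y => y))
    (PySem.List.sorted_pairwise_rev co (fun y => y))]
  rw [pvAltGo]
  ring
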